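-- pv_equiv track=rewrite | github.com/joshanashakya/dissertation | workspace/dataset/java-python/GeeksForGeeks/968/A/2.py | newString
-- ===== SOURCE A (Python) =====
-- def newString(s, k):
--
--     # new string
--     X = ""
--
--     # Remove characters until
--     # the string is empty
--     while (len(s) > 0):
--         temp = s[0]
--
--         # Traverse to find the smallest
--         # character in the first k characters
--         i = 1
--         while(i < k and i < len(s)):
--             if (s[i] < temp):
--                 temp = s[i]
--
--             i += 1
--
--         # append the smallest character
--         X = X + temp
--
--         # removing the lexicographically
--         # smallest character from the string
--         for i in range(k):
--             if (s[i] == temp):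
--                 s = s[0:i] + s[i + 1:]
--                 break
--
--     return X
-- ===== SOURCE B (Python) =====
-- def newString(s, k):
--     # Different algorithm: maintain a 128-slot count table (multiset) of the
--     # current k-wide window instead of rescanning and re-slicing the string.
--     n = len(s)
--     w = k if k < n else n
--     counts = [0] * 128
--     for c in s[:w]:
--         counts[ord(c)] += 1
--     out = []
--     j = w
--     for _ in range(n):
--         m = 0
--         while counts[m] == 0:
--             m += 1
--         counts[m] -= 1
--         out.append(chr(m))
--         if j < n:
--             counts[ord(s[j])] += 1
--             j += 1
--     return "".join(out)
-- ===== Notes on version B (the rewrite author's own statement) =====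
-- stated objective: faster
-- what changed: Instead of rescanning the first k characters and rebuilding the string by slicing on every round, B keeps a 128-slot count table (a multiset) of the k-wide sliding window, extracts its minimum each round and slides the window by one character.
import Mathlib
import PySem

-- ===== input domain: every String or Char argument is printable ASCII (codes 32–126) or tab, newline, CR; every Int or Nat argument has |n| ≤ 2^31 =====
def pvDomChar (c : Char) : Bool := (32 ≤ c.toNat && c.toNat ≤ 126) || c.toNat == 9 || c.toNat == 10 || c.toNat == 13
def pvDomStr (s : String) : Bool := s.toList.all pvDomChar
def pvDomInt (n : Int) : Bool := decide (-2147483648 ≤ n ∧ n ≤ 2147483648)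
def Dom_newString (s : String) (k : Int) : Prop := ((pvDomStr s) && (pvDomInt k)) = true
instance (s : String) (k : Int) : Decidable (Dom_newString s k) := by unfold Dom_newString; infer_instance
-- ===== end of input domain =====

-- B repeatedly extracts the minimum of the k-wide sliding window from a 128-slot count
-- table instead of rescanning and re-slicing the string each round (faster; measured).
-- A mutates only its local variable `s` (Python strings are immutable): no visible side effects.

-- ===== PORT A =====
-- inner while: running minimum temp over s[i] for i < k and i < len(s)
def aFindMin (l : List Char) (k : Int) (i : Nat) (temp : Char) : Char :=
  if h : (i : Int) < k ∧ i < l.length then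
    aFindMin l k (i + 1) (if l[i] < temp then l[i] else temp)
  else temp
termination_by l.length - i

-- `for i in range(k): if s[i] == temp: s = s[0:i] + s[i+1:]; break`
-- (Python would raise IndexError past the end; that is unreachable under Pre_, where
-- temp always occurs in s[:k]; there we return l unchanged)
def aRemove (l : List Char) (temp : Char) (i : Nat) (kk : Nat) : List Char :=
  if _h : i < kk then
    match l[i]? with
    | some c => if c = temp then l.take i ++ l.drop (i + 1) else aRemove l temp (i + 1) kk
    | none => l
  else l
termination_by kk - i

-- outer while, with fuel = len(s): under Pre_ each round removes exactly one character,
-- so the fuel is exact (outside Pre_ the Python loops forever)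
def aLoop : Nat → List Char → Int → List Char → List Char
  | 0, _, _, X => X
  | fuel + 1, l, k, X =>
    match l with
    | [] => X
    | c :: _ =>
      let temp := aFindMin l k 1 c
      aLoop fuel (aRemove l temp 0 k.toNat) k (X ++ [temp])

def newString (s : String) (k : Int) : String :=
  String.mk (aLoop s.toList.length s.toList k [])

-- ===== PORT B =====
-- counts[ord(c)] += 1 over the initial window
def bFill : List Nat → List Char → List Nat
  | counts, [] => counts
  | counts, c :: cs => bFill (counts.set c.toNat (counts.getD c.toNat 0 + 1)) cs

-- `while counts[m] == 0: m += 1` (IndexError past the end is unreachable under Pre_: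
-- the window is nonempty; there we return m)
def bScan (counts : List Nat) (m : Nat) : Nat :=
  if _h : m < counts.length then
    if counts.getD m 0 = 0 then bScan counts (m + 1) else m
  else m
termination_by counts.length - m

-- `for _ in range(n)`: emit min of the window, slide the window by one
def bLoop : Nat → List Nat → List Char → List Char → List Char
  | 0, _, _, out => out
  | steps + 1, counts, rest, out =>
    let m := bScan counts 0
    let counts1 := counts.set m (counts.getD m 0 - 1)
    let out1 := out ++ [Char.ofNat m]
    match rest with
    | [] => bLoop steps counts1 [] out1
    | c :: rs => bLoop steps (counts1.set c.toNat (counts1.getD c.toNat 0 + 1)) rs out1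

def newString_alt (s : String) (k : Int) : String :=
  let l := s.toList
  let n := l.length
  -- w = `k if k < n else n`; under Pre_ (1 ≤ k or s empty) this equals min k.toNat n
  let w := min k.toNat n
  String.mk (bLoop n (bFill (List.replicate 128 0) (l.take w)) (l.drop w) [])

-- ===== PRECONDITION & SPEC =====
-- Pre_ excludes k ≤ 0 with nonempty s: there A's removal loop `for i in range(k)` never
-- removes anything and the while loop DIVERGES (A returns no value).
def Pre_newString (s : String) (k : Int) : Prop := s = "" ∨ 1 ≤ k
instance (s : String) (k : Int) : Decidable (Pre_newString s k) := by unfold Pre_newString; infer_instance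
def pvWitness_newString : String × Int := ("cabdab", 3)
def Spec_newString (s : String) (k : Int) (out : String) : Prop := out = newString_alt s k
instance (s : String) (k : Int) (out : String) : Decidable (Spec_newString s k out) := by unfold Spec_newString; infer_instance

-- ===== CLAIM (what is proved, stated in full; the proofs are below) =====
def Claim_equal_newString : Prop := ∀ (s : String) (k : Int), Dom_newString s k → Pre_newString s k → Spec_newString s k (newString s k)

-- ===== LEMMAS AND PROOFS =====

-- count table (multiset) of a list of ASCII characters
def msOf (u : List Char) : List Nat := (List.range 128).map fun m => u.count (Char.ofNat m)

theorem toNat_ofNat_of_lt {n : Nat} (h : n < 128) : (Char.ofNat n).toNat = n := by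
  simp [Char.ofNat, Nat.isValidChar, show n < 0xd800 by omega, Char.toNat, Char.ofNatAux]

theorem msOf_length (u : List Char) : (msOf u).length = 128 := by simp [msOf]

theorem msOf_getD (u : List Char) {m : Nat} (h : m < 128) :
    (msOf u).getD m 0 = u.count (Char.ofNat m) := by
  simp [msOf, List.getD_eq_getElem?_getD, h]

theorem msOf_nil : msOf [] = List.replicate 128 0 := by simp [msOf]

theorem msOf_inc (u : List Char) (c : Char) (hc : c.toNat < 128) :
    (msOf u).set c.toNat ((msOf u).getD c.toNat 0 + 1) = msOf (u ++ [c]) := by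
  apply List.ext_getElem
  · simp [msOf]
  · intro i h1 h2
    have hi : i < 128 := by simpa [msOf] using h2
    rw [List.getElem_set]
    by_cases hic : c.toNat = i
    · subst hic
      simp [msOf, hi, Char.ofNat_toNat]
    · have : Char.ofNat i ≠ c := by
        intro hcon; apply hic; rw [← hcon, toNat_ofNat_of_lt hi]
      simp [hic, msOf, List.count_append, List.count_singleton, Ne.symm this]

theorem msOf_dec (u : List Char) (c : Char) (hmem : c ∈ u) (hc : c.toNat < 128) :
    (msOf u).set c.toNat ((msOf u).getD c.toNat 0 - 1) = msOf (u.erase c) := by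
  apply List.ext_getElem
  · simp [msOf]
  · intro i h1 h2
    have hi : i < 128 := by simpa [msOf] using h2
    rw [List.getElem_set]
    by_cases hic : c.toNat = i
    · subst hic
      simp [msOf, hi, Char.ofNat_toNat, List.count_erase_self]
    · have : Char.ofNat i ≠ c := by
        intro hcon; apply hic; rw [← hcon, toNat_ofNat_of_lt hi]
      simp [msOf, List.count_erase_of_ne this]
      intro h; exact absurd h hic

theorem bFill_msOf : ∀ (cs u : List Char), (∀ c ∈ cs, c.toNat < 128) →
    bFill (msOf u) cs = msOf (u ++ cs)
  | [], u, _ => by simp [bFill]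
  | c :: cs, u, h => by
    have hc : c.toNat < 128 := h c (by simp)
    rw [bFill, msOf_inc u c hc, bFill_msOf cs (u ++ [c]) (fun d hd => h d (by simp [hd]))]
    simp

theorem char_le_iff (c d : Char) : c ≤ d ↔ c.toNat ≤ d.toNat :=
  ⟨fun h => Fin.mk_le_mk.mp h, fun h => Char.le_def.mpr h⟩

theorem bScan_min (u : List Char) (t : Char) (h128 : ∀ c ∈ u, c.toNat < 128)
    (htmem : t ∈ u) (hminle : ∀ c ∈ u, t ≤ c) :
    ∀ m, m ≤ t.toNat → bScan (msOf u) m = t.toNat := by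
  have ht128 : t.toNat < 128 := h128 t htmem
  intro m
  induction hm : t.toNat - m generalizing m with
  | zero =>
    intro hle
    have hmt : m = t.toNat := by omega
    have hlen : m < (msOf u).length := by rw [msOf_length]; omega
    have hcnt : (msOf u).getD m 0 = u.count t := by
      rw [msOf_getD u (by omega), hmt, show Char.ofNat t.toNat = t from Char.ofNat_toNat t]
    have hne : ¬ u.count t = 0 := by
      have := List.count_pos_iff.mpr htmem; omega
    rw [bScan, dif_pos hlen, hcnt, if_neg hne]
    exact hmt
  | succ j ih =>
    intro hle
    have hmlt : m < t.toNat := by omega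
    have hlen : m < (msOf u).length := by rw [msOf_length]; omega
    have hcnt : (msOf u).getD m 0 = u.count (Char.ofNat m) := msOf_getD u (by omega)
    have hzero : u.count (Char.ofNat m) = 0 := by
      by_contra hne
      have hmem : Char.ofNat m ∈ u := List.count_pos_iff.mp (Nat.pos_of_ne_zero hne)
      have hlem := hminle (Char.ofNat m) hmem
      have h2 : t.toNat ≤ (Char.ofNat m).toNat := (char_le_iff t (Char.ofNat m)).mp hlem
      rw [toNat_ofNat_of_lt (by omega)] at h2
      omega
    rw [bScan, dif_pos hlen, hcnt, if_pos hzero]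
    exact ih (m + 1) (by omega) (by omega)

theorem aFindMin_foldl (l : List Char) (k : Int) (hk : 1 ≤ k) :
    ∀ i temp, aFindMin l k i temp =
      ((l.take (min k.toNat l.length)).drop i).foldl min temp := by
  intro i
  induction hm : min k.toNat l.length - i generalizing i with
  | zero =>
    intro temp
    have hge : min k.toNat l.length ≤ i := by omega
    rw [aFindMin]
    have hcond : ¬ ((i : Int) < k ∧ i < l.length) := by
      rintro ⟨h1, h2⟩
      have : i < k.toNat := by omega
      omega
    rw [dif_neg hcond]
    rw [List.drop_eq_nil_of_le (by simp [List.length_take]; omega)]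
    simp
  | succ j ih =>
    intro temp
    have hlt : i < min k.toNat l.length := by omega
    have hil : i < l.length := by omega
    have hik : (i : Int) < k := by omega
    rw [aFindMin, dif_pos ⟨hik, hil⟩]
    have hitake : i < (l.take (min k.toNat l.length)).length := by
      simp [List.length_take]; omega
    rw [List.drop_eq_getElem_cons hitake, List.foldl_cons]
    have hgele : (l.take (min k.toNat l.length))[i] = l[i] := List.getElem_take
    rw [hgele, ih (i + 1) (by omega)]
    congr 1
    rw [← min_def_lt' temp l[i]]

theorem aRemove_erase (l : List Char) (temp : Char) (kk : Nat) :
    ∀ i, (∃ j, i ≤ j ∧ j < kk ∧ l[j]? = some temp) →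
      aRemove l temp i kk = l.take i ++ (l.drop i).erase temp := by
  intro i
  induction hm : kk - i generalizing i with
  | zero => rintro ⟨j, h1, h2, h3⟩; omega
  | succ n ih =>
    rintro ⟨j, h1, h2, h3⟩
    have hik : i < kk := by omega
    have hil : i < l.length := by
      rcases Nat.lt_or_ge i l.length with h | h
      · exact h
      · exfalso
        have : j < l.length := (List.getElem?_eq_some_iff.mp h3).1
        omega
    rw [aRemove, dif_pos hik, List.getElem?_eq_getElem hil]
    show (if l[i] = temp then l.take i ++ l.drop (i + 1) else aRemove l temp (i + 1) kk) =
      l.take i ++ (l.drop i).erase temp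
    by_cases hc : l[i] = temp
    · rw [if_pos hc]
      rw [List.drop_eq_getElem_cons hil, List.erase_cons, if_pos (by simp [hc])]
    · rw [if_neg hc]
      have hji : j ≠ i := by
        intro hcon; subst hcon
        rw [List.getElem?_eq_getElem hil] at h3
        exact hc (by simpa using h3)
      rw [ih (i + 1) (by omega) ⟨j, by omega, h2, h3⟩]
      rw [List.drop_eq_getElem_cons hil, List.erase_cons, if_neg (by simp [hc])]
      rw [List.take_add_one, List.getElem?_eq_getElem hil, Option.toList_some,
        List.append_assoc, List.singleton_append]

-- one A-state is simulated by one B-state: counts is the multiset of the window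
-- (the first min(k, len) characters), rest is everything after the window
theorem simLoop (k : Int) (hk : 1 ≤ k) :
    ∀ n (l X : List Char), n = l.length → (∀ c ∈ l, c.toNat < 128) →
      aLoop n l k X =
        bLoop n (msOf (l.take (min k.toNat l.length))) (l.drop (min k.toNat l.length)) X := by
  intro n
  induction n with
  | zero =>
    intro l X hn _
    have : l = [] := List.eq_nil_of_length_eq_zero hn.symm
    subst this
    rfl
  | succ n ih =>
    intro l X hn h128
    match l, hn with
    | c :: ls, hn =>
    have hlen : (c :: ls).length = n + 1 := hn.symm
    have hlsn : ls.length = n := by simpa using hlen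
    have hkpos : 1 ≤ k.toNat := by omega
    set k' := min k.toNat (c :: ls).length with hk'
    have hk'pos : 1 ≤ k' := by rw [hk', hlen]; omega
    have hk'le : k' ≤ n + 1 := by rw [hk', hlen]; omega
    have hwcons : (c :: ls).take k' = c :: ls.take (k' - 1) := by
      cases hknat : k' with
      | zero => omega
      | succ m => simp
    set temp := (ls.take (k' - 1)).foldl min c with htemp
    have hminq : ((c :: ls).take k').min? = some temp := by rw [hwcons]; rfl
    obtain ⟨htmemw, htminw⟩ := List.min?_eq_some_iff.mp hminq
    have htmem : temp ∈ c :: ls := List.mem_of_mem_take htmemw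
    have hw128 : ∀ d ∈ (c :: ls).take k', d.toNat < 128 :=
      fun d hd => h128 d (List.mem_of_mem_take hd)
    have ht128 : temp.toNat < 128 := h128 temp htmem
    have hwlen : ((c :: ls).take k').length = k' := by simp [hlen]; omega
    -- A's inner scan computes the minimum of the window
    have hfind : aFindMin (c :: ls) k 1 c = temp := by
      rw [aFindMin_foldl (c :: ls) k hk 1 c, ← hk', hwcons]
      simp [htemp]
    -- A's removal loop erases (the first occurrence of) temp
    have hremove : aRemove (c :: ls) temp 0 k.toNat = (c :: ls).erase temp := by
      obtain ⟨j, hjlt, hjget⟩ := List.mem_iff_getElem.mp htmemw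
      have hjk : j < k' := by omega
      have hjl : j < (c :: ls).length := by omega
      have hget : (c :: ls)[j]? = some temp := by
        rw [List.getElem?_eq_getElem hjl]
        rw [← List.getElem_take (h := hjlt), hjget]
      have h0 := aRemove_erase (c :: ls) temp k.toNat 0
        ⟨j, Nat.zero_le _, by omega, hget⟩
      simpa using h0
    have herase : (c :: ls).erase temp = ((c :: ls).take k').erase temp ++ (c :: ls).drop k' := by
      conv_lhs => rw [← List.take_append_drop k' (c :: ls)]
      exact List.erase_append_left _ htmemw
    have herasewlen : (((c :: ls).take k').erase temp).length = k' - 1 := by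
      rw [List.length_erase_of_mem htmemw, hwlen]
    -- B's scan finds the same minimum
    have hbscan : bScan (msOf ((c :: ls).take k')) 0 = temp.toNat :=
      bScan_min _ temp hw128 htmemw htminw 0 (Nat.zero_le _)
    have hdec : (msOf ((c :: ls).take k')).set temp.toNat
          ((msOf ((c :: ls).take k')).getD temp.toNat 0 - 1)
        = msOf (((c :: ls).take k').erase temp) := msOf_dec _ temp htmemw ht128
    have hofnat : Char.ofNat temp.toNat = temp := Char.ofNat_toNat temp
    have herasemem : ∀ d ∈ (c :: ls).erase temp, d.toNat < 128 :=
      fun d hd => h128 d (List.mem_of_mem_erase hd)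
    have heraselen : ((c :: ls).erase temp).length = n := by
      rw [List.length_erase_of_mem htmem, hlen]
      omega
    cases hdrop : (c :: ls).drop k' with
    | nil =>
      -- the window is the whole remaining string
      have hk'' : k' = n + 1 := by
        have := List.drop_eq_nil_iff.mp hdrop
        omega
      have htake : (c :: ls).take k' = c :: ls := List.take_of_length_le (by omega)
      have hmin2 : min k.toNat ((c :: ls).erase temp).length = n := by
        rw [heraselen]; omega
      have ihe := ih ((c :: ls).erase temp) (X ++ [temp]) heraselen.symm herasemem
      rw [hmin2, List.take_of_length_le (le_of_eq heraselen),
        List.drop_eq_nil_of_le (le_of_eq heraselen)] at ihe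
      calc aLoop (n + 1) (c :: ls) k X
          = aLoop n (aRemove (c :: ls) (aFindMin (c :: ls) k 1 c) 0 k.toNat) k
              (X ++ [aFindMin (c :: ls) k 1 c]) := rfl
        _ = aLoop n ((c :: ls).erase temp) k (X ++ [temp]) := by rw [hfind, hremove]
        _ = bLoop n (msOf ((c :: ls).erase temp)) [] (X ++ [temp]) := ihe
        _ = bLoop (n + 1) (msOf ((c :: ls).take k')) [] X := by
            rw [bLoop, hbscan, hdec, hofnat]
            rw [herase, hdrop, List.append_nil]
    | cons d rs =>
      -- the window slides: temp leaves it, d enters it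
      have hk'lt : k' < n + 1 := by
        by_contra hcon
        rw [List.drop_eq_nil_of_le (by omega)] at hdrop
        simp at hdrop
      have hkk' : k' = k.toNat := by rw [hk', hlen] at *; omega
      have hd128 : d.toNat < 128 := by
        have : d ∈ (c :: ls).drop k' := by rw [hdrop]; simp
        exact h128 d (List.mem_of_mem_drop this)
      have hinc : (msOf (((c :: ls).take k').erase temp)).set d.toNat
            ((msOf (((c :: ls).take k').erase temp)).getD d.toNat 0 + 1)
          = msOf (((c :: ls).take k').erase temp ++ [d]) :=
        msOf_inc _ d hd128
      -- shape of the new window and rest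
      have hdroplen : ((c :: ls).drop k').length = n + 1 - k' := by simp [hlen]
      have htake2 : ((c :: ls).erase temp).take (min k.toNat ((c :: ls).erase temp).length)
          = ((c :: ls).take k').erase temp ++ [d] := by
        rw [heraselen, herase, hdrop]
        have hm : min k.toNat n = k' := by omega
        rw [hm, List.take_append]
        rw [herasewlen, List.take_of_length_le (by rw [herasewlen]; omega)]
        have h1 : k' - (k' - 1) = 1 := by omega
        rw [h1]
        simp
      have hdrop2 : ((c :: ls).erase temp).drop (min k.toNat ((c :: ls).erase temp).length)
          = rs := by
        rw [heraselen, herase, hdrop]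
        have hm : min k.toNat n = k' := by omega
        rw [hm, List.drop_append]
        rw [herasewlen]
        have h1 : k' - (k' - 1) = 1 := by omega
        rw [h1, List.drop_eq_nil_of_le (by rw [herasewlen]; omega)]
        simp
      have ihe := ih ((c :: ls).erase temp) (X ++ [temp]) heraselen.symm herasemem
      rw [htake2, hdrop2] at ihe
      calc aLoop (n + 1) (c :: ls) k X
          = aLoop n (aRemove (c :: ls) (aFindMin (c :: ls) k 1 c) 0 k.toNat) k
              (X ++ [aFindMin (c :: ls) k 1 c]) := rfl
        _ = aLoop n ((c :: ls).erase temp) k (X ++ [temp]) := by rw [hfind, hremove]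
        _ = bLoop n (msOf (((c :: ls).take k').erase temp ++ [d])) rs (X ++ [temp]) := ihe
        _ = bLoop (n + 1) (msOf ((c :: ls).take k')) (d :: rs) X := by
            rw [bLoop, hbscan, hdec, hofnat, hinc]

-- ===== VERDICT (by name: the statement is the Claim_ definition above) =====
theorem newString_spec : Claim_equal_newString := by
  intro s k hdom hpre
  unfold Spec_newString newString newString_alt
  rcases hpre with hs | hk
  · subst hs; rfl
  · have h128 : ∀ c ∈ s.toList, c.toNat < 128 := by
      intro c hc
      have hcc : pvDomChar c = true := by
        simp only [Dom_newString, Bool.and_eq_true, pvDomStr, List.all_eq_true] at hdom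
        exact hdom.1 c hc
      simp only [pvDomChar, Bool.or_eq_true, Bool.and_eq_true, decide_eq_true_eq,
        beq_iff_eq] at hcc
      omega
    have hfill : bFill (List.replicate 128 0)
          (s.toList.take (min k.toNat s.toList.length))
        = msOf (s.toList.take (min k.toNat s.toList.length)) := by
      rw [← msOf_nil, bFill_msOf _ [] (fun d hd => h128 d (List.mem_of_mem_take hd))]
      simp
    simp only [hfill]
    exact congrArg String.mk (simLoop k hk s.toList.length s.toList [] rfl h128)
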